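-- pv_equiv track=rewrite | github.com/pb2640/Practice-problems | strings/capitalize.py | detectCapitalUse
-- ===== SOURCE A (Python) =====
-- def detectCapitalUse(word: str) -> bool:
--     ref = set(list("QWERTYUIOPASDFGHJKLZXCVBNM"))
--     if len(word) == 1:
--         return True
--     first = word[0]
--     second = word[1]
--     if first not in ref:
--         # rets letters should not be in if for true
--         for letter in word:
--             if letter in ref:
--                 return False
--         return True
--     if first in ref and second in ref:
--         for letter in word:
--             if letter not in ref:
--                 return False
--         return True
--     else:
--         for i in range(2, len(word)):
--             if word[i] in ref:
--                 return False
--         return True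
-- ===== SOURCE B (Python) =====
-- def detectCapitalUse(word: str) -> bool:
--     ref = set("QWERTYUIOPASDFGHJKLZXCVBNM")
--     upper = sum(c in ref for c in word)
--     return upper == 0 or upper == len(word) or (upper == 1 and word[0] in ref)
-- ===== Notes on version B (the rewrite author's own statement) =====
-- stated objective: simpler
-- what changed: Replaces A's first/second-char case analysis with three separate partial scans by one pass counting uppercase letters and a closed-form decision (all lower, all upper, or capitalized).
import Mathlib
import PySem

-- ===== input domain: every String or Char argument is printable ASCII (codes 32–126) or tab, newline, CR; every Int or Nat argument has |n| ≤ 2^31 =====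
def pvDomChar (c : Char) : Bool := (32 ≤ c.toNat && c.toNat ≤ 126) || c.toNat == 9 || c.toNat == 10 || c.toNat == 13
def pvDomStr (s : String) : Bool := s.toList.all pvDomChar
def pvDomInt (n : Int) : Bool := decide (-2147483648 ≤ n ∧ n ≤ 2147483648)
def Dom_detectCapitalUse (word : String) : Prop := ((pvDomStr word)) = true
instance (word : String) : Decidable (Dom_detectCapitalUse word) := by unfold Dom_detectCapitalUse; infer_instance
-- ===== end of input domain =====

-- B replaces A's first/second-char case analysis with three scans by one pass counting
-- uppercase letters and a closed-form decision; equal return values on nonempty strings.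

-- ===== PORT A =====
-- ref = set(list("QWERTYUIOPASDFGHJKLZXCVBNM"))
def pvRefA : PySem.Set Char := PySem.Set.ofList "QWERTYUIOPASDFGHJKLZXCVBNM".toList

def detectCapitalUse (word : String) : Bool :=
  let cs := word.toList
  if cs.length = 1 then true
  else
    match cs with
    | [] => true  -- Python raises IndexError at word[0] here; excluded by Pre_
    | [_] => true -- unreachable (length = 1 handled above)
    | first :: second :: _ =>
      if !(pvRefA.contains first) then
        -- for letter in word: if letter in ref: return False / return True
        cs.all (fun letter => !(pvRefA.contains letter))
      else if pvRefA.contains first && pvRefA.contains second then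
        -- for letter in word: if letter not in ref: return False / return True
        cs.all (fun letter => pvRefA.contains letter)
      else
        -- for i in range(2, len(word)): if word[i] in ref: return False / return True
        (PySem.List.pyRange 2 cs.length 1).all
          (fun i => !(pvRefA.contains (PySem.List.pyGetD cs i ' ')))

-- ===== PORT B =====
-- Source B's ref is the same literal set; the shared constant pvRefA is reused here

def detectCapitalUse_alt (word : String) : Bool :=
  let cs := word.toList
  let upper := cs.countP (fun c => pvRefA.contains c)
  -- word[0] is only reached in Python when upper ≥ 1, hence cs ≠ []; headD is safe
  upper == 0 || upper == cs.length || (upper == 1 && pvRefA.contains (cs.headD ' '))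

-- ===== PRECONDITION & SPEC =====
-- Pre_ excludes only the empty string, on which Python A raises IndexError at word[0].
def Pre_detectCapitalUse (word : String) : Prop := word ≠ ""
instance (word : String) : Decidable (Pre_detectCapitalUse word) := by unfold Pre_detectCapitalUse; infer_instance
def pvWitness_detectCapitalUse : String := "Google"

def Spec_detectCapitalUse (word : String) (out : Bool) : Prop := out = detectCapitalUse_alt word
instance (word : String) (out : Bool) : Decidable (Spec_detectCapitalUse word out) := by unfold Spec_detectCapitalUse; infer_instance

-- ===== CLAIM (what is proved, stated in full; the proofs are below) =====
def Claim_equal_detectCapitalUse : Prop := ∀ (word : String), Dom_detectCapitalUse word → Pre_detectCapitalUse word → Spec_detectCapitalUse word (detectCapitalUse word)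

-- ===== LEMMAS AND PROOFS =====

theorem countP_zero_iff_all {α : Type} (p : α → Bool) (l : List α) :
    (l.countP p = 0) ↔ l.all (fun a => !p a) = true := by
  simp [List.countP_eq_zero, List.all_eq_true]

theorem countP_len_iff_all {α : Type} (p : α → Bool) (l : List α) :
    (l.countP p = l.length) ↔ l.all p = true := by
  simp [List.countP_eq_length, List.all_eq_true]

-- The heart of the equivalence: on a list of length ≥ 2, A's three-branch scan
-- equals B's closed form over the uppercase count, for any predicate p.
theorem branch_eq_count (p : Char → Bool) (first second : Char) (rest : List Char) :
    (if !(p first) then (first :: second :: rest).all (fun l => !(p l))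
     else if p first && p second then (first :: second :: rest).all p
     else (PySem.List.pyRange 2 ((first :: second :: rest) : List Char).length 1).all
        (fun i => !(p (PySem.List.pyGetD (first :: second :: rest) i ' '))))
    = ((first :: second :: rest).countP p == 0
        || (first :: second :: rest).countP p == (first :: second :: rest).length
        || ((first :: second :: rest).countP p == 1 && p ((first :: second :: rest).headD ' '))) := by
  have hrange : (PySem.List.pyRange 2 ((first :: second :: rest) : List Char).length 1).all
      (fun i => !(p (PySem.List.pyGetD (first :: second :: rest) i ' ')))
      = rest.all (fun c => !(p c)) := by
    have hmap : (PySem.List.pyRange 2 ((first :: second :: rest) : List Char).length 1).map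
        (fun i => PySem.List.pyGetD (first :: second :: rest) i ' ')
        = (first :: second :: rest).drop 2 := by
      simpa using PySem.List.map_pyGetD_pyRange (xs := first :: second :: rest)
        (a := 2) (d := ' ') (by norm_num)
    rw [show (fun i => !(p (PySem.List.pyGetD (first :: second :: rest) i ' ')))
        = ((fun c => !(p c)) ∘ (fun i => PySem.List.pyGetD (first :: second :: rest) i ' '))
        from rfl, ← List.all_map, hmap]
    rfl
  have hle := List.countP_le_length (p := p) (l := rest)
  cases hpf : p first with
  | false =>
    rw [if_pos (by simp [hpf])]
    by_cases hall : (first :: second :: rest).all (fun l => !(p l)) = true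
    · have hc : (first :: second :: rest).countP p = 0 := (countP_zero_iff_all p _).mpr hall
      simp [hall, hc]
    · have hc : (first :: second :: rest).countP p ≠ 0 := by
        intro h; exact hall ((countP_zero_iff_all p _).mp h)
      have hcl : (first :: second :: rest).countP p ≠ (first :: second :: rest).length := by
        intro h
        have := (countP_len_iff_all p _).mp h
        simp [List.all_eq_true] at this
        exact absurd this.1 (by simp [hpf])
      rw [Bool.not_eq_true] at hall
      have e0 : ((first :: second :: rest).countP p == 0) = false := by simpa using hc
      have el : ((first :: second :: rest).countP p == (first :: second :: rest).length) = false := by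
        simpa using hcl
      rw [hall, e0, el]
      simp [hpf]
  | true =>
    cases hps : p second with
    | true =>
      rw [if_neg (by simp [hpf]), if_pos (by simp [hpf, hps])]
      by_cases hall : (first :: second :: rest).all p = true
      · have hc : (first :: second :: rest).countP p = (first :: second :: rest).length :=
          (countP_len_iff_all p _).mpr hall
        simp [hall, hc]
      · have hcl : (first :: second :: rest).countP p ≠ (first :: second :: rest).length := by
          intro h; exact hall ((countP_len_iff_all p _).mp h)
        have hc0 : (first :: second :: rest).countP p ≠ 0 := by
          intro h
          have := (countP_zero_iff_all p _).mp h
          simp [List.all_eq_true] at this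
          exact absurd this.1 (by simp [hpf])
        have hc1 : (first :: second :: rest).countP p ≠ 1 := by
          simp [List.countP_cons, hpf, hps]
        rw [Bool.not_eq_true] at hall
        have e0 : ((first :: second :: rest).countP p == 0) = false := by simpa using hc0
        have e1 : ((first :: second :: rest).countP p == 1) = false := by simpa using hc1
        have el : ((first :: second :: rest).countP p == (first :: second :: rest).length) = false := by
          simpa using hcl
        rw [hall, e0, e1, el]
        simp
    | false =>
      rw [if_neg (by simp [hpf]), if_neg (by simp [hps]), hrange]
      have hcount : (first :: second :: rest).countP p = rest.countP p + 1 := by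
        simp [List.countP_cons, hpf, hps]
      by_cases hr : rest.all (fun c => !(p c)) = true
      · have hc : rest.countP p = 0 := (countP_zero_iff_all p rest).mpr hr
        simp [hr, hcount, hc, hpf]
      · have hc : rest.countP p ≠ 0 := fun h => hr ((countP_zero_iff_all p rest).mp h)
        have hc1 : (first :: second :: rest).countP p ≠ 1 := by omega
        have hc0 : (first :: second :: rest).countP p ≠ 0 := by omega
        have hcl : (first :: second :: rest).countP p ≠ (first :: second :: rest).length := by
          simp only [hcount, List.length_cons]
          omega
        rw [Bool.not_eq_true] at hr
        have e0 : ((first :: second :: rest).countP p == 0) = false := by simpa using hc0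
        have e1 : ((first :: second :: rest).countP p == 1) = false := by simpa using hc1
        have el : ((first :: second :: rest).countP p == (first :: second :: rest).length) = false := by
          simpa using hcl
        rw [hr, e0, e1, el]
        simp

-- ===== VERDICT (by name: the statement is the Claim_ definition above) =====
theorem detectCapitalUse_spec : Claim_equal_detectCapitalUse := by
  intro word _ hpre
  unfold Spec_detectCapitalUse detectCapitalUse detectCapitalUse_alt
  have hcs : word.toList ≠ [] := fun h => hpre (String.toList_eq_nil_iff.mp h)
  simp only []
  set cs := word.toList with hcsdef
  clear_value cs
  match cs, hcs with
  | [c], _ =>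
    cases h : pvRefA.contains c <;> simp [List.countP_cons, h] <;> exact (Decidable.em _).symm
  | first :: second :: rest, _ =>
    have hlen : ((first :: second :: rest) : List Char).length ≠ 1 := by simp
    rw [if_neg hlen]
    exact branch_eq_count (fun c => pvRefA.contains c) first second rest
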